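-- pv_equiv track=rewrite | github.com/Yan-nian/torrent-maker | deprecated/src/file_matcher.py | _format_episode_range
-- ===== SOURCE A (Python) =====
-- from typing import List, Dict, Any, Tuple, Optional, Set
--
-- def _format_episode_range(episode_numbers: List[int]) -> str:
--     """
--     格式化集数范围，智能分组显示连续片段
--
--     Args:
--         episode_numbers: 集数列表
--
--     Returns:
--         格式化的集数范围字符串
--     """
--     if not episode_numbers:
--         return ""
--
--     episode_numbers = sorted(set(episode_numbers))  # 去重并排序
--
--     if len(episode_numbers) == 1:
--         return f"E{episode_numbers[0]:02d}"
--
--     # 检查是否完全连续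
--     is_fully_continuous = all(
--         episode_numbers[i] == episode_numbers[i-1] + 1
--         for i in range(1, len(episode_numbers))
--     )
--
--     if is_fully_continuous:
--         # 完全连续，使用范围格式
--         return f"E{episode_numbers[0]:02d}-E{episode_numbers[-1]:02d}"
--     else:
--         # 有断集，分组显示连续片段
--         groups = []
--         start = episode_numbers[0]
--         end = episode_numbers[0]
--
--         for i in range(1, len(episode_numbers)):
--             if episode_numbers[i] == end + 1:
--                 # 连续，扩展当前组
--                 end = episode_numbers[i]
--             else:
--                 # 不连续，结束当前组，开始新组
--                 if start == end:
--                     groups.append(f"E{start:02d}")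
--                 else:
--                     groups.append(f"E{start:02d}-E{end:02d}")
--                 start = episode_numbers[i]
--                 end = episode_numbers[i]
--
--         # 添加最后一组
--         if start == end:
--             groups.append(f"E{start:02d}")
--         else:
--             groups.append(f"E{start:02d}-E{end:02d}")
--
--         return ",".join(groups)
-- ===== SOURCE B (Python) =====
-- from typing import List
--
--
-- def _format_episode_range(episode_numbers: List[int]) -> str:
--     """Format episode numbers into grouped continuous ranges (e.g. E01-E03,E05)."""
--     if not episode_numbers:
--         return ""
--
--     xs = sorted(set(episode_numbers))
--
--     # An element starts a run iff its predecessor is absent or not one less;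
--     # it ends a run iff its successor is absent or not one more.
--     starts = [x for p, x in zip([None] + xs, xs) if p is None or p + 1 != x]
--     ends = [x for x, n in zip(xs, xs[1:] + [None]) if n is None or n != x + 1]
--
--     return ",".join(
--         f"E{s:02d}" if s == e else f"E{s:02d}-E{e:02d}"
--         for s, e in zip(starts, ends)
--     )
-- ===== Notes on version B (the rewrite author's own statement) =====
-- stated objective: simpler
-- what changed: Replaces A's three-way branching (singleton / fully-continuous check / stateful accumulator loop) by a uniform boundary scan: run starts and run ends are picked out by neighbour comparisons over zipped shifted lists and zipped back together, with no special cases.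
import Mathlib
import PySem

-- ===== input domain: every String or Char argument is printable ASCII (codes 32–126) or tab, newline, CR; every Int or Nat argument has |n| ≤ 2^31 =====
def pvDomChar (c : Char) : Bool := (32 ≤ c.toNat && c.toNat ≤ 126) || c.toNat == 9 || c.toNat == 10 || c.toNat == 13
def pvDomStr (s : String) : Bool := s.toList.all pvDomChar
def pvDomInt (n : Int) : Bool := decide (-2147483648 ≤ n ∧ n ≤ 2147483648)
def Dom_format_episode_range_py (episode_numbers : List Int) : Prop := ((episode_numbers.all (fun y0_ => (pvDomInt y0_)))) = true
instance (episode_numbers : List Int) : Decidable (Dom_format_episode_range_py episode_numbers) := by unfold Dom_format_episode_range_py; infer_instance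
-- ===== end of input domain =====

-- B replaces A's three-way branching (singleton / fully-continuous / accumulator loop) by a
-- uniform neighbour-comparison boundary scan; objective: simpler (no special cases).

-- f"{n:02d}" (zero-pad to width 2; the sign counts towards the width, so only 0..9 get a pad)
def pvFmt02 (n : Int) : List Char :=
  if 0 ≤ n ∧ n < 10 then '0' :: PySem.Int.toChars n else PySem.Int.toChars n

-- f"E{n:02d}"
def pvE1 (n : Int) : List Char := 'E' :: pvFmt02 n

-- f"E{s:02d}" if s == e else f"E{s:02d}-E{e:02d}"
def pvPiece (s e : Int) : List Char :=
  if s = e then pvE1 s else pvE1 s ++ '-' :: pvE1 e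

-- ===== PORT A =====
-- all(episode_numbers[i] == episode_numbers[i-1] + 1 for i in range(1, len(...))) as the
-- structural walk over adjacent elements (prev carried explicitly)
def pvAllConsec : Int → List Int → Bool
  | _, [] => true
  | p, x :: t => (x == p + 1) && pvAllConsec x t

-- the body of A's for-loop: state (groups, start, end), one episode number x
def pvStep (acc : List (List Char) × Int × Int) (x : Int) : List (List Char) × Int × Int :=
  if x = acc.2.2 + 1 then (acc.1, acc.2.1, x)
  else (acc.1 ++ [pvPiece acc.2.1 acc.2.2], x, x)

def format_episode_range_py (episode_numbers : List Int) : String :=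
  if episode_numbers = [] then ""
  else
    match PySem.List.sorted (PySem.Set.ofList episode_numbers) (fun x => x) false with
    | [] => ""  -- unreachable: sorted(set(xs)) of a nonempty xs is nonempty
    | y :: t =>
      if t = [] then String.ofList (pvE1 y)
      else if pvAllConsec y t then
        String.ofList (pvE1 y ++ '-' :: pvE1 (List.getLastD t y))
      else
        let st := t.foldl pvStep ([], y, y)
        String.ofList (PySem.Chars.join [','] (st.1 ++ [pvPiece st.2.1 st.2.2]))

-- ===== PORT B =====
-- keep condition of Source B's `starts` comprehension: p is None or p + 1 != x
def pvStartKeep : Option Int × Int → Bool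
  | (none, _) => true
  | (some p, x) => decide (p + 1 ≠ x)

-- keep condition of Source B's `ends` comprehension: n is None or n != x + 1
def pvEndKeep : Int × Option Int → Bool
  | (_, none) => true
  | (x, some n) => decide (n ≠ x + 1)

def format_episode_range_py_alt (episode_numbers : List Int) : String :=
  if episode_numbers = [] then ""
  else
    let xs := PySem.List.sorted (PySem.Set.ofList episode_numbers) (fun x => x) false
    let starts := ((List.zip (none :: xs.map some) xs).filter pvStartKeep).map Prod.snd
    let ends := ((List.zip xs (xs.tail.map some ++ [none])).filter pvEndKeep).map Prod.fst
    String.ofList (PySem.Chars.join [',']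
      ((List.zip starts ends).map (fun se => pvPiece se.1 se.2)))

-- ===== PRECONDITION & SPEC =====
def Spec_format_episode_range_py (episode_numbers : List Int) (out : String) : Prop := out = format_episode_range_py_alt episode_numbers
instance (episode_numbers : List Int) (out : String) : Decidable (Spec_format_episode_range_py episode_numbers out) := by unfold Spec_format_episode_range_py; infer_instance

-- ===== CLAIM (what is proved, stated in full; the proofs are below) =====
def Claim_equal_format_episode_range_py : Prop := ∀ (episode_numbers : List Int), Dom_format_episode_range_py episode_numbers → Spec_format_episode_range_py episode_numbers (format_episode_range_py episode_numbers)

-- ===== LEMMAS AND PROOFS =====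

-- the maximal consecutive runs of (s, …, e, t…) as (start, end) pairs
def pvRuns (s e : Int) : List Int → List (Int × Int)
  | [] => [(s, e)]
  | x :: t => if x = e + 1 then pvRuns s x t else (s, e) :: pvRuns x x t

-- A's loop produces exactly the pieces of pvRuns
theorem pvFoldl_runs (t : List Int) (gs : List (List Char)) (s e : Int) :
    (t.foldl pvStep (gs, s, e)).1
      ++ [pvPiece (t.foldl pvStep (gs, s, e)).2.1 (t.foldl pvStep (gs, s, e)).2.2]
    = gs ++ (pvRuns s e t).map (fun p => pvPiece p.1 p.2) := by
  induction t generalizing gs s e with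
  | nil => simp [pvRuns]
  | cons x t ih =>
    by_cases h : x = e + 1 <;> simp [pvStep, pvRuns, h, ih]

-- B's `starts` after the leading element: later run starts, given the previous element p
def pvStarts (p : Int) : List Int → List Int
  | [] => []
  | x :: t => if p + 1 = x then pvStarts x t else x :: pvStarts x t

-- B's `ends`: run ends of (x, t…), given the current element x
def pvEnds (x : Int) : List Int → List Int
  | [] => [x]
  | n :: t => if n = x + 1 then pvEnds n t else x :: pvEnds n t

theorem pvStarts_spec (t : List Int) (p : Int) :
    ((List.zip (some p :: t.map some) t).filter pvStartKeep).map Prod.snd = pvStarts p t := by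
  induction t generalizing p with
  | nil => simp [pvStarts]
  | cons x t ih =>
    by_cases h : p + 1 = x <;> simp [pvStarts, pvStartKeep, h, ih]

theorem pvEnds_spec (t : List Int) (x : Int) :
    ((List.zip (x :: t) (t.map some ++ [none])).filter pvEndKeep).map Prod.fst = pvEnds x t := by
  induction t generalizing x with
  | nil => simp [pvEnds, pvEndKeep]
  | cons n t ih =>
    by_cases h : n = x + 1 <;> simp [pvEnds, pvEndKeep, h, ih]

theorem pvZip_starts_ends (t : List Int) (s e : Int) :
    List.zip (s :: pvStarts e t) (pvEnds e t) = pvRuns s e t := by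
  induction t generalizing s e with
  | nil => simp [pvStarts, pvEnds, pvRuns]
  | cons x t ih =>
    by_cases h : x = e + 1
    · have h' : e + 1 = x := h.symm
      simp only [pvStarts, pvEnds, pvRuns, if_pos h, if_pos h']
      exact ih s x
    · have h' : ¬ (e + 1 = x) := fun hc => h hc.symm
      simp only [pvStarts, pvEnds, pvRuns, if_neg h, if_neg h']
      rw [List.zip_cons_cons, ih]

-- fully-consecutive: the last element is y + len(t), in particular strictly above y
theorem pvAllConsec_getLast (t : List Int) (y : Int) (h : pvAllConsec y t = true)
    (hne : t ≠ []) : List.getLastD t y = y + t.length := by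
  induction t generalizing y with
  | nil => exact absurd rfl hne
  | cons x t ih =>
    simp only [pvAllConsec, Bool.and_eq_true, beq_iff_eq] at h
    cases t with
    | nil => simp [List.getLastD, h.1]
    | cons b u =>
      have hrec := ih x h.2 (by simp)
      rw [List.getLastD_cons, hrec]
      simp only [List.length_cons]
      push_cast
      omega

theorem pvAllConsec_runs (t : List Int) (s y : Int) (h : pvAllConsec y t = true) :
    pvRuns s y t = [(s, List.getLastD t y)] := by
  induction t generalizing s y with
  | nil => simp [pvRuns, List.getLastD]
  | cons x t ih =>
    simp only [pvAllConsec, Bool.and_eq_true, beq_iff_eq] at h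
    simp only [pvRuns, if_pos h.1]
    cases t with
    | nil => simp [pvRuns, List.getLastD]
    | cons b u =>
      rw [ih s x h.2]
      conv_rhs => rw [List.getLastD_cons]

-- B on a nonempty sorted list equals the joined run pieces
theorem pvAlt_eq_runs (y : Int) (t : List Int) :
    PySem.Chars.join [','] ((List.zip
        (((List.zip (none :: (y :: t).map some) (y :: t)).filter pvStartKeep).map Prod.snd)
        (((List.zip (y :: t) ((y :: t).tail.map some ++ [none])).filter pvEndKeep).map Prod.fst)).map
        (fun se => pvPiece se.1 se.2))
    = PySem.Chars.join [','] ((pvRuns y y t).map (fun p => pvPiece p.1 p.2)) := by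
  have h1 : ((List.zip (none :: (y :: t).map some) (y :: t)).filter pvStartKeep).map Prod.snd
      = y :: pvStarts y t := by
    simp only [List.map_cons, List.zip_cons_cons, List.filter_cons]
    simpa [pvStartKeep] using pvStarts_spec t y
  have h2 : ((List.zip (y :: t) ((y :: t).tail.map some ++ [none])).filter pvEndKeep).map Prod.fst
      = pvEnds y t := pvEnds_spec t y
  rw [h1, h2, pvZip_starts_ends]

-- ===== VERDICT (by name: the statement is the Claim_ definition above) =====
theorem format_episode_range_py_spec : Claim_equal_format_episode_range_py := by
  intro eps _
  unfold Spec_format_episode_range_py format_episode_range_py format_episode_range_py_alt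
  by_cases hnil : eps = []
  · simp [hnil]
  · rw [if_neg hnil, if_neg hnil]
    cases hys : PySem.List.sorted (PySem.Set.ofList eps) (fun x => x) false with
    | nil => simp
    | cons y t =>
      simp only [pvAlt_eq_runs y t]
      by_cases ht : t = []
      · subst ht
        simp [pvRuns, pvPiece, PySem.Chars.join_singleton]
      · rw [if_neg ht]
        by_cases hc : pvAllConsec y t = true
        · rw [if_pos hc, pvAllConsec_runs t y y hc]
          have hlast : List.getLastD t y = y + t.length := pvAllConsec_getLast t y hc ht
          have hne : y ≠ List.getLastD t y := by
            rw [hlast]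
            have : 0 < t.length := List.length_pos_iff.mpr ht
            omega
          simp only [List.map_cons, List.map_nil, PySem.Chars.join_singleton]
          unfold pvPiece
          rw [if_neg hne]
        · rw [if_neg hc]
          simp only [pvFoldl_runs t [] y y, List.nil_append]
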